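-- pv_equiv track=rewrite | github.com/Leonardase/ScoopSense | src/importance.py | score_combo
-- ===== SOURCE A (Python) =====
-- def score_combo(order, keep_set, maybe_flavors):
--     """
--     Finds the most efficient combination of flavor need by scoring a potential order,
--     helping to minimize number of rinses
--     """
--     temp_order = [f for f in order if f not in maybe_flavors or f in keep_set]
--
--     # Collapse consecutive Rinses and trim start/end if needed
--     cleaned = []
--     for item in temp_order:
--         if item == "RINSE" and (not cleaned or cleaned[-1] == "RINSE"):
--             continue
--         cleaned.append(item)
--
--     # Remove trailing RINSE
--     while cleaned and cleaned[-1] == "RINSE":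
--         cleaned.pop()
--
--     return cleaned.count("RINSE"), cleaned
-- ===== SOURCE B (Python) =====
-- def score_combo(order, keep_set, maybe_flavors):
--     temp_order = [f for f in order if f not in maybe_flavors or f in keep_set]
--     # Split on "RINSE" into nonempty non-rinse segments, then rejoin the
--     # segments with single "RINSE" separators; the rinse count is just
--     # (number of segments - 1), no counting pass over the result.
--     segments = []
--     cur = []
--     for f in temp_order:
--         if f == "RINSE":
--             if cur:
--                 segments.append(cur)
--                 cur = []
--         else:
--             cur.append(f)
--     if cur:
--         segments.append(cur)
--     cleaned = []
--     for seg in segments: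
--         if cleaned:
--             cleaned.append("RINSE")
--         cleaned.extend(seg)
--     return (len(segments) - 1 if segments else 0, cleaned)
-- ===== Notes on version B (the rewrite author's own statement) =====
-- stated objective: alternative
-- what changed: Replaces A's stateful collapse (skip a RINSE when the output is empty or ends in RINSE), trailing pop-while loop and final counting scan with a split/rejoin algorithm: the filtered order is split on RINSE into nonempty non-rinse segments, the result is the segments rejoined with single RINSE separators, and the count is len(segments)-1 in closed form with no scan of the result.
import Mathlib
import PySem

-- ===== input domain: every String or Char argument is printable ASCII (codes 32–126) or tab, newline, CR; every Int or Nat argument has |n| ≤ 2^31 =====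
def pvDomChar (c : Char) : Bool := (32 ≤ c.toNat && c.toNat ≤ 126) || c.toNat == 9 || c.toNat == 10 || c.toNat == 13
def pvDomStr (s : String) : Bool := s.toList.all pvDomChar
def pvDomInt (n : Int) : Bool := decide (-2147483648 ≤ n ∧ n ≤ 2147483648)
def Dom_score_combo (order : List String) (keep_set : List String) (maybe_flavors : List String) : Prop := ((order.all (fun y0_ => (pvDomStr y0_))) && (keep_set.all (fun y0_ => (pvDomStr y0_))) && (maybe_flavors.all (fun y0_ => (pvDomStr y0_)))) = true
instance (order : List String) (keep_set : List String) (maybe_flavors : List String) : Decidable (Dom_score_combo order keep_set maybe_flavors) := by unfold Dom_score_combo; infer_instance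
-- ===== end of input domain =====

-- B replaces A's collapse-then-strip-then-count passes by splitting the filtered
-- order on "RINSE" into nonempty segments, rejoining them with single separators,
-- and computing the count as segments-1 in closed form (objective: alternative).

-- ===== PORT A =====
-- while cleaned and cleaned[-1] == "RINSE": cleaned.pop()
def popRinse (l : List String) : List String :=
  if h : l.getLast? = some "RINSE" then popRinse l.dropLast else l
termination_by l.length
decreasing_by
  have hne : l ≠ [] := by intro he; simp [he] at h
  simpa using Nat.pred_lt (by simpa using List.length_pos_iff.mpr hne |>.ne')

def score_combo (order : List String) (keep_set : List String) (maybe_flavors : List String) : Int × List String :=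
  let temp_order := order.filter (fun f => !(maybe_flavors.contains f) || keep_set.contains f)
  let cleaned := temp_order.foldl
    (fun cleaned item =>
      if item = "RINSE" ∧ (cleaned = [] ∨ cleaned.getLast? = some "RINSE")
      then cleaned
      else cleaned ++ [item]) []
  let cleaned := popRinse cleaned
  ((PySem.List.count cleaned "RINSE" : Int), cleaned)

-- ===== PORT B =====
def score_combo_alt (order : List String) (keep_set : List String) (maybe_flavors : List String) : Int × List String :=
  let temp_order := order.filter (fun f => !(maybe_flavors.contains f) || keep_set.contains f)
  -- split on "RINSE" into (segments, cur)
  let p := temp_order.foldl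
    (fun (p : List (List String) × List String) f =>
      if f = "RINSE" then (if p.2 ≠ [] then (p.1 ++ [p.2], ([] : List String)) else p)
      else (p.1, p.2 ++ [f]))
    ([], [])
  let segments := if p.2 ≠ [] then p.1 ++ [p.2] else p.1
  -- rejoin with single "RINSE" separators
  let cleaned := segments.foldl
    (fun cleaned seg => (if cleaned ≠ [] then cleaned ++ ["RINSE"] else cleaned) ++ seg) []
  (if segments = [] then (0 : Int) else (segments.length : Int) - 1, cleaned)

-- ===== PRECONDITION & SPEC =====
def Spec_score_combo (order : List String) (keep_set : List String) (maybe_flavors : List String) (out : Int × List String) : Prop := out = score_combo_alt order keep_set maybe_flavors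
instance (order : List String) (keep_set : List String) (maybe_flavors : List String) (out : Int × List String) : Decidable (Spec_score_combo order keep_set maybe_flavors out) := by unfold Spec_score_combo; infer_instance

-- ===== CLAIM (what is proved, stated in full; the proofs are below) =====
def Claim_equal_score_combo : Prop := ∀ (order : List String) (keep_set : List String) (maybe_flavors : List String), Dom_score_combo order keep_set maybe_flavors → Spec_score_combo order keep_set maybe_flavors (score_combo order keep_set maybe_flavors)

-- ===== LEMMAS AND PROOFS =====

-- collapse with a "previous element was RINSE (or virtual start-of-run)" flag
def dedupB (b : Bool) : List String → List String
  | [] => []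
  | x :: xs =>
      if x = "RINSE" then
        (if b then dedupB true xs else "RINSE" :: dedupB true xs)
      else x :: dedupB false xs

lemma foldA_eq (l : List String) : ∀ acc : List String,
    l.foldl (fun cleaned item =>
      if item = "RINSE" ∧ (cleaned = [] ∨ cleaned.getLast? = some "RINSE")
      then cleaned else cleaned ++ [item]) acc
      = acc ++ dedupB (decide (acc = [] ∨ acc.getLast? = some "RINSE")) l := by
  induction l with
  | nil => intro acc; simp [dedupB]
  | cons x xs ih =>
      intro acc
      rw [List.foldl_cons]
      by_cases hx : x = "RINSE"
      · subst hx
        by_cases hc : acc = [] ∨ acc.getLast? = some "RINSE"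
        · rw [if_pos ⟨rfl, hc⟩, ih acc, decide_eq_true hc]
          simp [dedupB]
        · rw [if_neg (fun h => hc h.2), ih (acc ++ ["RINSE"])]
          have h1 : (acc ++ ["RINSE"]).getLast? = some "RINSE" := by simp
          rw [decide_eq_false hc]
          simp [dedupB, h1]
      · rw [if_neg (fun h => hx h.1), ih (acc ++ [x])]
        have h1 : (acc ++ [x]).getLast? = some x := by simp
        have h2 : (decide (acc ++ [x] = [] ∨ (acc ++ [x]).getLast? = some "RINSE")) = false := by
          simp [h1, hx]
        rw [h2]
        simp [dedupB, hx]

lemma headT_ne (l : List String) : (dedupB true l).head? ≠ some "RINSE" := by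
  induction l with
  | nil => simp [dedupB]
  | cons x xs ih =>
      by_cases hx : x = "RINSE"
      · simpa [dedupB, hx] using ih
      · simp [dedupB, hx]

lemma chain_dedupB (l : List String) : ∀ b,
    List.IsChain (fun a b : String => a ≠ "RINSE" ∨ b ≠ "RINSE") (dedupB b l) := by
  induction l with
  | nil => intro b; exact List.isChain_nil
  | cons x xs ih =>
      intro b
      by_cases hx : x = "RINSE"
      · cases b with
        | true => simpa [dedupB, hx] using ih true
        | false =>
            rw [show dedupB false (x :: xs) = "RINSE" :: dedupB true xs by simp [dedupB, hx]]
            rw [List.isChain_cons]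
            refine ⟨?_, ih true⟩
            intro y hy
            right
            intro hy'
            subst hy'
            exact headT_ne xs (Option.mem_def.mp hy)
      · simp only [dedupB, if_neg hx]
        rw [List.isChain_cons]
        exact ⟨fun y _ => Or.inl hx, ih false⟩

lemma chain_rev {l : List String}
    (h : List.IsChain (fun a b : String => a ≠ "RINSE" ∨ b ≠ "RINSE") l) :
    List.IsChain (fun a b : String => a ≠ "RINSE" ∨ b ≠ "RINSE") l.reverse := by
  rw [List.isChain_reverse]
  exact h.imp (fun a b hab => hab.symm)

-- on collapsed lists the pop-while loop removes at most one trailing "RINSE"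
lemma popRinse_eq (c : List String)
    (h : List.IsChain (fun a b : String => a ≠ "RINSE" ∨ b ≠ "RINSE") c) :
    popRinse c = if c.getLast? = some "RINSE" then c.dropLast else c := by
  have hrev := chain_rev h
  rcases hr : c.reverse with _ | ⟨a, rs⟩
  · have hc : c = [] := by simpa using congrArg List.reverse hr
    subst hc
    rw [popRinse]; simp
  · have hc : c = rs.reverse ++ [a] := by
      have := congrArg List.reverse hr
      simpa using this
    rw [hr] at hrev
    by_cases ha : a = "RINSE"
    · have hlast : c.getLast? = some "RINSE" := by
        rw [hc, ha]; simp
      have hrshead : rs.head? ≠ some "RINSE" := by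
        intro hh
        rw [List.isChain_cons] at hrev
        rcases hrev.1 _ hh with h1 | h2
        · exact h1 ha
        · exact h2 rfl
      have hdrop : c.dropLast = rs.reverse := by rw [hc]; simp
      rw [popRinse]
      rw [dif_pos hlast, if_pos hlast, hdrop]
      rw [popRinse]
      rw [dif_neg (by rw [List.getLast?_reverse]; exact hrshead)]
    · have hlast : c.getLast? = some a := by rw [hc]; simp
      rw [popRinse]
      rw [dif_neg (by rw [hlast]; simp [ha]), if_neg (by rw [hlast]; simp [ha])]

-- strip one trailing "RINSE"
def stripT (c : List String) : List String :=
  if c.getLast? = some "RINSE" then c.dropLast else c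

-- canonical cleaned list: flag true = at the start or just after a kept boundary run
def cF : Bool → List String → List String
  | _, [] => []
  | b, x :: xs =>
      if x = "RINSE" then
        (if b then cF true xs
         else if cF true xs = [] then [] else "RINSE" :: cF true xs)
      else x :: cF false xs

lemma stripT_dedupB (l : List String) :
    stripT (dedupB true l) = cF true l ∧ stripT (dedupB false l) = cF false l := by
  induction l with
  | nil => constructor <;> simp [dedupB, cF, stripT]
  | cons x xs ih =>
      by_cases hx : x = "RINSE"
      · subst hx
        constructor
        · simpa [dedupB, cF] using ih.1
        · have hT : dedupB false ("RINSE" :: xs) = "RINSE" :: dedupB true xs := by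
            simp [dedupB]
          rw [hT]
          rcases hd : dedupB true xs with _ | ⟨y, ys⟩
          · have h1 : cF true xs = [] := by
              have := ih.1; rw [hd] at this; simpa [stripT] using this.symm
            simp [stripT, cF, h1]
          · have hy : y ≠ "RINSE" := by
              have := headT_ne xs; rw [hd] at this; simpa using this
            have hIH : stripT (y :: ys) = cF true xs := by rw [← hd]; exact ih.1
            by_cases hlast : (y :: ys).getLast? = some "RINSE"
            · have hys : ys ≠ [] := by
                intro he; rw [he] at hlast; simp at hlast; exact hy hlast
              have hcf : cF true xs = y :: ys.dropLast := by
                rw [← hIH, stripT, if_pos hlast, List.dropLast_cons_of_ne_nil hys]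
              have hlast2 : ("RINSE" :: y :: ys).getLast? = some "RINSE" := by
                rw [List.getLast?_cons_cons]; exact hlast
              rw [cF]
              rw [if_pos rfl, if_neg (by simp), if_neg (by simp [hcf])]
              rw [stripT, if_pos hlast2, hcf]
              simp [List.dropLast_cons_of_ne_nil hys]
            · have hcf : cF true xs = y :: ys := by
                rw [← hIH, stripT, if_neg hlast]
              rw [cF]
              rw [if_pos rfl, if_neg (by simp), if_neg (by simp [hcf])]
              rw [stripT]
              rw [if_neg (by rw [List.getLast?_cons_cons]; exact hlast), hcf]
      · have key : ∀ b : Bool, stripT (dedupB b (x :: xs)) = x :: cF false xs := by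
          intro b
          have hD : dedupB b (x :: xs) = x :: dedupB false xs := by
            cases b <;> simp [dedupB, hx]
          rw [hD]
          rcases hd : dedupB false xs with _ | ⟨y, ys⟩
          · have h1 : cF false xs = [] := by
              have := ih.2; rw [hd] at this; simpa [stripT] using this.symm
            simp [stripT, hx, h1]
          · have hIH : stripT (y :: ys) = cF false xs := by rw [← hd]; exact ih.2
            by_cases hlast : (y :: ys).getLast? = some "RINSE"
            · have hlast2 : (x :: y :: ys).getLast? = some "RINSE" := by
                rw [List.getLast?_cons_cons]; exact hlast
              rw [stripT, if_pos hlast2, List.dropLast_cons_of_ne_nil (by simp)]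
              rw [← hIH, stripT, if_pos hlast]
            · have hlast2 : (x :: y :: ys).getLast? = some "RINSE" → False := by
                rw [List.getLast?_cons_cons]; exact fun h => hlast h
              rw [stripT, if_neg hlast2, ← hIH, stripT, if_neg hlast]
        constructor
        · simpa [cF, hx] using key true
        · simpa [cF, hx] using key false

-- ---- B side ----

def splitAux : List String → List String → List (List String) × List String
  | cur, [] => ([], cur)
  | cur, x :: xs =>
      if x = "RINSE" then
        (if cur = [] then splitAux [] xs
         else (cur :: (splitAux [] xs).1, (splitAux [] xs).2))
      else splitAux (cur ++ [x]) xs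

lemma foldB_eq (l : List String) : ∀ (segs : List (List String)) (cur : List String),
    l.foldl
      (fun (p : List (List String) × List String) f =>
        if f = "RINSE" then (if p.2 ≠ [] then (p.1 ++ [p.2], ([] : List String)) else p)
        else (p.1, p.2 ++ [f]))
      (segs, cur)
      = (segs ++ (splitAux cur l).1, (splitAux cur l).2) := by
  induction l with
  | nil => intro segs cur; simp [splitAux]
  | cons x xs ih =>
      intro segs cur
      rw [List.foldl_cons]
      by_cases hx : x = "RINSE"
      · subst hx
        by_cases hc : cur = []
        · subst hc
          simpa [splitAux] using ih segs []
        · rw [if_pos rfl, if_pos (show (segs, cur).2 ≠ [] from hc)]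
          rw [ih (segs ++ [cur]) []]
          simp [splitAux, hc]
      · simp only [if_neg hx]
        rw [ih segs (cur ++ [x])]
        simp [splitAux, hx]

lemma splitAux_inv (l : List String) : ∀ cur : List String, "RINSE" ∉ cur →
    (∀ s ∈ (splitAux cur l).1, s ≠ [] ∧ "RINSE" ∉ s) ∧ "RINSE" ∉ (splitAux cur l).2 := by
  induction l with
  | nil => intro cur hcur; simp [splitAux, hcur]
  | cons x xs ih =>
      intro cur hcur
      by_cases hx : x = "RINSE"
      · subst hx
        by_cases hc : cur = []
        · subst hc
          simpa [splitAux] using ih [] (by simp)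
        · have h0 := ih [] (by simp)
          simp only [splitAux, if_neg hc]
          refine ⟨?_, h0.2⟩
          intro s hs
          rcases List.mem_cons.mp hs with h | h
          · exact ⟨h ▸ hc, h ▸ hcur⟩
          · exact h0.1 s h
      · have hcur' : "RINSE" ∉ cur ++ [x] := by
          simp [hcur, Ne.symm hx]
        simp only [splitAux, if_neg hx]
        exact ih (cur ++ [x]) hcur'

-- join segments with single "RINSE" separators
def joinR : List (List String) → List String
  | [] => []
  | s :: rest => s ++ rest.flatMap (fun t => "RINSE" :: t)

lemma foldJ_ne (segs : List (List String)) : ∀ acc : List String, acc ≠ [] →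
    segs.foldl (fun cleaned seg => (if cleaned ≠ [] then cleaned ++ ["RINSE"] else cleaned) ++ seg) acc
      = acc ++ segs.flatMap (fun t => "RINSE" :: t) := by
  induction segs with
  | nil => intro acc _; simp
  | cons s rest ih =>
      intro acc hacc
      rw [List.foldl_cons]
      rw [if_pos hacc]
      rw [ih (acc ++ ["RINSE"] ++ s) (by simp)]
      simp

lemma foldJ_eq (segs : List (List String)) (hne : ∀ s ∈ segs, s ≠ []) :
    segs.foldl (fun cleaned seg => (if cleaned ≠ [] then cleaned ++ ["RINSE"] else cleaned) ++ seg) []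
      = joinR segs := by
  cases segs with
  | nil => simp [joinR]
  | cons s rest =>
      rw [List.foldl_cons]
      rw [if_neg (by simp)]
      rw [List.nil_append]
      rw [foldJ_ne rest s (hne s (by simp))]
      rfl

def fullSegs (p : List (List String) × List String) : List (List String) :=
  if p.2 ≠ [] then p.1 ++ [p.2] else p.1

lemma fullSegs_inv (l : List String) :
    ∀ s ∈ fullSegs (splitAux [] l), s ≠ [] ∧ "RINSE" ∉ s := by
  have h := splitAux_inv l [] (by simp)
  intro s hs
  unfold fullSegs at hs
  split at hs
  · rcases List.mem_append.mp hs with h1 | h1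
    · exact h.1 s h1
    · rename_i hsnd
      have : s = (splitAux [] l).2 := by simpa using h1
      exact ⟨this ▸ hsnd, this ▸ h.2⟩
  · exact h.1 s hs

lemma joinR_fullSegs (l : List String) : ∀ cur : List String,
    joinR (fullSegs (splitAux cur l)) = (if cur = [] then cF true l else cur ++ cF false l) := by
  induction l with
  | nil =>
      intro cur
      by_cases hc : cur = [] <;> simp [splitAux, fullSegs, joinR, cF, hc]
  | cons x xs ih =>
      intro cur
      by_cases hx : x = "RINSE"
      · subst hx
        by_cases hc : cur = []
        · subst hc
          simpa [splitAux, cF] using ih []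
        · have hsegs : fullSegs (splitAux cur ("RINSE" :: xs))
              = cur :: fullSegs (splitAux [] xs) := by
            simp only [splitAux, if_neg hc, fullSegs]
            by_cases h2 : (splitAux [] xs).2 = [] <;> simp [h2]
          rw [hsegs]
          have hIH : joinR (fullSegs (splitAux [] xs)) = cF true xs := by
            simpa using ih []
          rcases hseg : fullSegs (splitAux [] xs) with _ | ⟨s, rest⟩
          · have h1 : cF true xs = [] := by rw [← hIH, hseg]; rfl
            simp [joinR, cF, hc, h1]
          · have hsne : s ≠ [] := (fullSegs_inv xs s (by rw [hseg]; simp)).1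
            have h1 : cF true xs = s ++ rest.flatMap (fun t => "RINSE" :: t) := by
              rw [← hIH, hseg]; rfl
            have h2 : cF true xs ≠ [] := by rw [h1]; simp [hsne]
            rw [joinR]
            rw [show (s :: rest).flatMap (fun t => "RINSE" :: t)
                  = "RINSE" :: (s ++ rest.flatMap (fun t => "RINSE" :: t)) by simp]
            rw [← h1]
            simp [cF, hc, h2]
      · have hstep : splitAux cur (x :: xs) = splitAux (cur ++ [x]) xs := by
          simp [splitAux, hx]
        rw [hstep, ih (cur ++ [x]) ]
        rw [if_neg (by simp)]
        by_cases hc : cur = [] <;> simp [cF, hx, hc]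

lemma flat_count (rest : List (List String)) (h : ∀ s ∈ rest, "RINSE" ∉ s) :
    (rest.flatMap (fun t => "RINSE" :: t)).count "RINSE" = rest.length := by
  induction rest with
  | nil => simp
  | cons t ts ih =>
      have ht : t.count "RINSE" = 0 := List.count_eq_zero.mpr (h t (by simp))
      have hts := ih (fun u hu => h u (List.mem_cons_of_mem _ hu))
      simp [List.count_append, ht, hts]

lemma count_joinR (segs : List (List String)) (h : ∀ s ∈ segs, "RINSE" ∉ s) :
    ((joinR segs).count "RINSE" : Int) = if segs = [] then 0 else (segs.length : Int) - 1 := by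
  cases segs with
  | nil => simp [joinR]
  | cons s rest =>
      rw [joinR]
      rw [if_neg (by simp)]
      have hs : s.count "RINSE" = 0 :=
        List.count_eq_zero.mpr (h s (by simp))
      rw [List.count_append, hs]
      have hflat : (rest.flatMap (fun t => "RINSE" :: t)).count "RINSE" = rest.length :=
        flat_count rest (fun u hu => h u (List.mem_cons_of_mem _ hu))
      rw [hflat]
      simp only [List.length_cons]
      push_cast
      ring

lemma ports_agree (order keep_set maybe_flavors : List String) :
    score_combo order keep_set maybe_flavors = score_combo_alt order keep_set maybe_flavors := by
  simp only [score_combo, score_combo_alt]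
  set temp := order.filter (fun f => !(maybe_flavors.contains f) || keep_set.contains f) with htemp
  -- A side
  rw [foldA_eq]
  rw [show (decide (([] : List String) = [] ∨ ([] : List String).getLast? = some "RINSE")) = true by decide]
  rw [List.nil_append]
  rw [popRinse_eq _ (chain_dedupB temp true)]
  have hA : (if (dedupB true temp).getLast? = some "RINSE" then (dedupB true temp).dropLast
             else dedupB true temp) = cF true temp := (stripT_dedupB temp).1
  rw [hA]
  -- B side
  rw [foldB_eq]
  rw [List.nil_append]
  have hsegs : (if (splitAux [] temp).2 ≠ [] then (splitAux [] temp).1 ++ [(splitAux [] temp).2]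
                else (splitAux [] temp).1) = fullSegs (splitAux [] temp) := rfl
  rw [hsegs]
  have hinv := fullSegs_inv temp
  rw [foldJ_eq _ (fun s hs => (hinv s hs).1)]
  have hjoin : joinR (fullSegs (splitAux [] temp)) = cF true temp := by
    simpa using joinR_fullSegs temp []
  rw [hjoin]
  have hcount : ((cF true temp).count "RINSE" : Int)
      = if fullSegs (splitAux [] temp) = [] then (0 : Int)
        else ((fullSegs (splitAux [] temp)).length : Int) - 1 := by
    rw [← hjoin]
    exact count_joinR _ (fun s hs => (hinv s hs).2)
  rw [PySem.List.count_eq, hcount]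

-- ===== VERDICT (by name: the statement is the Claim_ definition above) =====
theorem score_combo_spec : Claim_equal_score_combo := by
  intro order keep_set maybe_flavors _
  unfold Spec_score_combo
  exact ports_agree order keep_set maybe_flavors
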